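-- pv_equiv track=rewrite | github.com/diogenespn/validador_cnab | validators/cnab240/common.py | validar_lotes_cnab240
-- ===== SOURCE A (Python) =====
-- def validar_lotes_cnab240(linhas):
--     """
--     Valida a existência de header e trailer de lote para cada lote.
--     - Lote: posições 4 a 7 (índices 3 a 7 em Python)
--     - Tipo de registro: posição 8 (índice 7)
--       0 = Header Arquivo
--       1 = Header Lote
--       3 = Detalhe
--       5 = Trailer Lote
--       9 = Trailer Arquivo
--     """
--     erros = []
--
--     lotes = {}  # {numero_lote: {"header": False, "trailer": False, "tem_detalhe": False}}
--
--     for i, linha in enumerate(linhas, start=1):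
--         if linha.strip() == "":
--             continue
--
--         if len(linha.rstrip("\n\r")) < 8:
--             erros.append(f"Linha {i}: muito curta para ler lote/tipo de registro.")
--             continue
--
--         tipo = linha[7:8]
--         numero_lote = linha[3:7]
--
--         # Header e trailer de arquivo (tipo 0 e 9) usam lote "0000" em geral, ignoramos aqui
--         if tipo in {"0", "9"}:
--             continue
--
--         if numero_lote not in lotes:
--             lotes[numero_lote] = {
--                 "header": False,
--                 "trailer": False,
--                 "tem_detalhe": False,
--             }
--
--         if tipo == "1":
--             lotes[numero_lote]["header"] = True
--         elif tipo == "5":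
--             lotes[numero_lote]["trailer"] = True
--         elif tipo == "3":
--             lotes[numero_lote]["tem_detalhe"] = True
--
--     for numero_lote, info in lotes.items():
--         if not info["header"]:
--             erros.append(f"Lote {numero_lote}: não possui Header de Lote (tipo 1).")
--         if not info["trailer"]:
--             erros.append(f"Lote {numero_lote}: não possui Trailer de Lote (tipo 5).")
--         if not info["tem_detalhe"]:
--             erros.append(
--                 f"Lote {numero_lote}: não possui registros de detalhe (tipo 3)."
--             )
--
--     return erros
-- ===== SOURCE B (Python) =====
-- def validar_lotes_cnab240(linhas):
--     # staged passes: parse first, then validate each lot by scanning the parsed records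
--     regs = [(i, l) for i, l in enumerate(linhas, start=1) if l.strip() != ""]
--     erros = [f"Linha {i}: muito curta para ler lote/tipo de registro."
--              for i, l in regs if len(l.rstrip("\n\r")) < 8]
--     recs = [(l[3:7], l[7]) for _, l in regs
--             if len(l.rstrip("\n\r")) >= 8 and l[7] not in "09"]
--     lotes = []
--     for lote, _ in recs:
--         if lote not in lotes:
--             lotes.append(lote)
--     for lote in lotes:
--         if not any(t == "1" for lo, t in recs if lo == lote):
--             erros.append(f"Lote {lote}: não possui Header de Lote (tipo 1).")
--         if not any(t == "5" for lo, t in recs if lo == lote):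
--             erros.append(f"Lote {lote}: não possui Trailer de Lote (tipo 5).")
--         if not any(t == "3" for lo, t in recs if lo == lote):
--             erros.append(f"Lote {lote}: não possui registros de detalhe (tipo 3).")
--     return erros
-- ===== Notes on version B (the rewrite author's own statement) =====
-- stated objective: alternative
-- what changed: A's single pass with a dict of per-lot boolean flags is replaced by staged passes: comprehensions first extract the short-line errors and a list of (lot, type) records, then an ordered dedup list of lots is built and each lot is validated by scanning the record list with any(...) for types '1'/'5'/'3' (no dict, no per-line flag updates).
import Mathlib
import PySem

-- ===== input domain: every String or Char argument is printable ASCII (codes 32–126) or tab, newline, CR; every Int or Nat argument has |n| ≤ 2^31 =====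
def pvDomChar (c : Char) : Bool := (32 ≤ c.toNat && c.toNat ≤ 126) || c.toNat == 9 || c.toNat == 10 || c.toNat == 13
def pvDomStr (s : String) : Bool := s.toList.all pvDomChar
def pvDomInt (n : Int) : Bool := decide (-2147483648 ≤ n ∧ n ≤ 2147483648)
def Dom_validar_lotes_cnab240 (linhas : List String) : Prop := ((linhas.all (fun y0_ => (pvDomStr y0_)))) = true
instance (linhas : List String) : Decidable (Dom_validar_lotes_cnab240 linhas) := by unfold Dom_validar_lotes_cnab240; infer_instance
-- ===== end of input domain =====

-- B replaces A's single pass with a per-lot dict of three booleans by staged passes: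
-- comprehensions extract short-line errors and (lot, type) records, then each lot
-- (deduplicated in order) is validated by scanning the record list; alternative, same results.


-- ===== PORT A =====
-- exact port of str.rstrip("\n\r"): drop trailing '\n' / '\r' characters (shared by both ports)
def pvRstripNl (cs : List Char) : List Char :=
  (cs.reverse.dropWhile (fun c => c == '\n' || c == '\r')).reverse

-- the f-string literals (shared by both ports; identical in both Pythons)
def pvMsgCurta (i : Int) : String :=
  "Linha " ++ PySem.Int.toStr i ++ ": muito curta para ler lote/tipo de registro."
def pvMsgHeader (numero : List Char) : String :=
  "Lote " ++ String.ofList numero ++ ": não possui Header de Lote (tipo 1)."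
def pvMsgTrailer (numero : List Char) : String :=
  "Lote " ++ String.ofList numero ++ ": não possui Trailer de Lote (tipo 5)."
def pvMsgDetalhe (numero : List Char) : String :=
  "Lote " ++ String.ofList numero ++ ": não possui registros de detalhe (tipo 3)."

-- one iteration of A's loop over enumerate(linhas, start=1); state = (erros, lotes)
def pvStepA (st : List String × PySem.Dict (List Char) (Bool × Bool × Bool)) (p : Int × String) :
    List String × PySem.Dict (List Char) (Bool × Bool × Bool) :=
  let cs := p.2.toList
  if PySem.Chars.strip cs = [] then st
  else if (pvRstripNl cs).length < 8 then (st.1 ++ [pvMsgCurta p.1], st.2)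
  else
    let tipo := PySem.List.slice cs (some 7) (some 8)
    let numero := PySem.List.slice cs (some 3) (some 7)
    if tipo = ['0'] ∨ tipo = ['9'] then st
    else
      let lotes := if st.2.contains numero then st.2 else st.2.insert numero (false, false, false)
      let lotes :=
        if tipo = ['1'] then lotes.modify numero (false, false, false) (fun q => (true, q.2.1, q.2.2))
        else if tipo = ['5'] then lotes.modify numero (false, false, false) (fun q => (q.1, true, q.2.2))
        else if tipo = ['3'] then lotes.modify numero (false, false, false) (fun q => (q.1, q.2.1, true))
        else lotes
      (st.1, lotes)

def validar_lotes_cnab240 (linhas : List String) : List String :=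
  let st := (PySem.List.enumerate linhas 1).foldl pvStepA ([], PySem.Dict.empty)
  st.2.items.foldl (fun erros q =>
    let erros := if q.2.1 = false then erros ++ [pvMsgHeader q.1] else erros
    let erros := if q.2.2.1 = false then erros ++ [pvMsgTrailer q.1] else erros
    if q.2.2.2 = false then erros ++ [pvMsgDetalhe q.1] else erros) st.1

-- ===== PORT B =====
-- regs = [(i, l) ... if l.strip() != ""]
def pvRegs (ps : List (Int × String)) : List (Int × String) :=
  ps.filter (fun p => !(PySem.Chars.strip p.2.toList == []))

-- erros = [f"Linha {i}: ..." for i, l in regs if len(l.rstrip("\n\r")) < 8]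
def pvShortMsgs (rs : List (Int × String)) : List String :=
  (rs.filter (fun p => decide ((pvRstripNl p.2.toList).length < 8))).map (fun p => pvMsgCurta p.1)

-- one element of the recs comprehension; the guard of the comprehension becomes the `none` cases.
-- l[7] is in range in the taken branch (len(l.rstrip("\n\r")) ≥ 8), so the default is never used.
def pvRecOf (p : Int × String) : Option (List Char × Char) :=
  if (pvRstripNl p.2.toList).length < 8 then none
  else
    let t := PySem.List.pyGetD p.2.toList 7 ' '
    if t = '0' ∨ t = '9' then none
    else some (PySem.List.slice p.2.toList (some 3) (some 7), t)

-- recs = [(l[3:7], l[7]) for _, l in regs if len(l.rstrip("\n\r")) >= 8 and l[7] not in "09"]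
def pvRecsOf (rs : List (Int × String)) : List (List Char × Char) :=
  rs.filterMap pvRecOf

def validar_lotes_cnab240_alt (linhas : List String) : List String :=
  let regs := pvRegs (PySem.List.enumerate linhas 1)
  let erros := pvShortMsgs regs
  let recs := pvRecsOf regs
  -- lotes: ordered list of distinct lot numbers
  let lotes := recs.foldl (fun acc r => if r.1 ∈ acc then acc else acc ++ [r.1]) ([] : List (List Char))
  lotes.foldl (fun e k =>
    let e := if recs.any (fun r => r.1 == k && r.2 == '1') = false then e ++ [pvMsgHeader k] else e
    let e := if recs.any (fun r => r.1 == k && r.2 == '5') = false then e ++ [pvMsgTrailer k] else e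
    if recs.any (fun r => r.1 == k && r.2 == '3') = false then e ++ [pvMsgDetalhe k] else e) erros

-- ===== PRECONDITION & SPEC =====
def Spec_validar_lotes_cnab240 (linhas : List String) (out : List String) : Prop := out = validar_lotes_cnab240_alt linhas
instance (linhas : List String) (out : List String) : Decidable (Spec_validar_lotes_cnab240 linhas out) := by unfold Spec_validar_lotes_cnab240; infer_instance

-- ===== CLAIM (what is proved, stated in full; the proofs are below) =====
def Claim_equal_validar_lotes_cnab240 : Prop := ∀ (linhas : List String), Dom_validar_lotes_cnab240 linhas → Spec_validar_lotes_cnab240 linhas (validar_lotes_cnab240 linhas)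

-- ===== LEMMAS AND PROOFS =====

-- B's ordered dedup of the lot numbers of a record list
def pvDedup (recs : List (List Char × Char)) : List (List Char) :=
  recs.foldl (fun acc r => if r.1 ∈ acc then acc else acc ++ [r.1]) []

-- the boolean triple A keeps for a lot, expressed by B's scans of the record list
def pvFlags (recs : List (List Char × Char)) (k : List Char) : Bool × Bool × Bool :=
  (recs.any (fun r => r.1 == k && r.2 == '1'),
   recs.any (fun r => r.1 == k && r.2 == '5'),
   recs.any (fun r => r.1 == k && r.2 == '3'))

-- the items list A's dict holds after processing `recs`
def pvL (recs : List (List Char × Char)) : List (List Char × (Bool × Bool × Bool)) :=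
  (pvDedup recs).map (fun k => (k, pvFlags recs k))

theorem pv_mem_dedupFrom (recs : List (List Char × Char)) (acc : List (List Char)) (k : List Char) :
    (k ∈ recs.foldl (fun acc r => if r.1 ∈ acc then acc else acc ++ [r.1]) acc) ↔
      (k ∈ acc ∨ ∃ r ∈ recs, r.1 = k) := by
  induction recs generalizing acc with
  | nil => simp
  | cons r t ih =>
    simp only [List.foldl_cons]
    by_cases hm : r.1 ∈ acc
    · rw [if_pos hm, ih]
      constructor
      · rintro (h | ⟨r', hr', rfl⟩)
        · exact Or.inl h
        · exact Or.inr ⟨r', List.mem_cons_of_mem _ hr', rfl⟩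
      · rintro (h | ⟨r', hr', rfl⟩)
        · exact Or.inl h
        · rcases List.mem_cons.mp hr' with rfl | hr'
          · exact Or.inl hm
          · exact Or.inr ⟨r', hr', rfl⟩
    · rw [if_neg hm, ih]
      constructor
      · rintro (h | ⟨r', hr', rfl⟩)
        · rcases List.mem_append.mp h with h | h
          · exact Or.inl h
          · exact Or.inr ⟨r, List.mem_cons_self .., (List.mem_singleton.mp h).symm⟩
        · exact Or.inr ⟨r', List.mem_cons_of_mem _ hr', rfl⟩
      · rintro (h | ⟨r', hr', rfl⟩)
        · exact Or.inl (List.mem_append.mpr (Or.inl h))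
        · rcases List.mem_cons.mp hr' with rfl | hr'
          · exact Or.inl (List.mem_append.mpr (Or.inr (List.mem_singleton.mpr rfl)))
          · exact Or.inr ⟨r', hr', rfl⟩

theorem pv_mem_dedup (recs : List (List Char × Char)) (k : List Char) :
    k ∈ pvDedup recs ↔ ∃ r ∈ recs, r.1 = k := by
  unfold pvDedup
  rw [pv_mem_dedupFrom]
  simp

theorem pvDedup_append (recs : List (List Char × Char)) (r : List Char × Char) :
    pvDedup (recs ++ [r]) =
      if r.1 ∈ pvDedup recs then pvDedup recs else pvDedup recs ++ [r.1] := by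
  unfold pvDedup
  rw [List.foldl_append]
  rfl

theorem pvFlags_append_ne (recs : List (List Char × Char)) (k : List Char) (t : Char)
    (k' : List Char) (h : k' ≠ k) :
    pvFlags (recs ++ [(k, t)]) k' = pvFlags recs k' := by
  simp [pvFlags, List.any_append, Ne.symm h]

theorem pvFlags_append_self (recs : List (List Char × Char)) (k : List Char) (t : Char) :
    pvFlags (recs ++ [(k, t)]) k =
      ((pvFlags recs k).1 || t == '1', (pvFlags recs k).2.1 || t == '5',
       (pvFlags recs k).2.2 || t == '3') := by
  simp [pvFlags, List.any_append]

theorem pvFlags_of_not_mem (recs : List (List Char × Char)) (k : List Char)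
    (h : k ∉ pvDedup recs) :
    pvFlags recs k = (false, false, false) := by
  rw [pv_mem_dedup] at h
  simp only [pvFlags, Prod.mk.injEq]
  refine ⟨?_, ?_, ?_⟩ <;>
    · rw [List.any_eq_false]
      intro r hr
      have : ¬ r.1 = k := fun hk => h ⟨r, hr, hk⟩
      simp [this]

theorem pvFind_map (f : List Char → Bool × Bool × Bool) (d : List (List Char)) (k : List Char) :
    (d.map (fun k' => (k', f k'))).find? (fun p => p.1 == k) =
      if k ∈ d then some (k, f k) else none := by
  induction d with
  | nil => simp
  | cons a t ih =>
    by_cases h : a = k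
    · subst h
      simp
    · simp [beq_eq_false_iff_ne.mpr h, ih, Ne.symm h]

theorem pvContains_L (dA : PySem.Dict (List Char) (Bool × Bool × Bool))
    (recs : List (List Char × Char)) (k : List Char) (h : dA.items = pvL recs) :
    dA.contains k = decide (k ∈ pvDedup recs) := by
  show dA.items.any (fun p => p.1 == k) = _
  rw [h]
  unfold pvL
  rw [List.any_map]
  by_cases hk : k ∈ pvDedup recs
  · simp only [hk, decide_true]
    rw [List.any_eq_true]
    exact ⟨k, hk, by simp⟩
  · simp only [hk, decide_false]
    rw [List.any_eq_false]
    intro x hx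
    simp only [Function.comp]
    intro hbe
    exact hk ((beq_iff_eq.mp hbe) ▸ hx)

theorem pvGetD_L (dA : PySem.Dict (List Char) (Bool × Bool × Bool))
    (recs : List (List Char × Char)) (k : List Char) (h : dA.items = pvL recs)
    (hk : k ∈ pvDedup recs) :
    dA.getD k (false, false, false) = pvFlags recs k := by
  rw [PySem.Dict.getD_eq_get?_getD]
  show (Option.map (fun x => x.2) ((dA.items).find? (fun p => p.1 == k))).getD _ = _
  rw [h]
  unfold pvL
  rw [pvFind_map]
  simp [hk]

-- A's per-record dict update, characterized by B's dedup list and flag scans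
theorem pvDictStep (recs : List (List Char × Char)) (dA : PySem.Dict (List Char) (Bool × Bool × Bool))
    (h : dA.items = pvL recs) (k : List Char) (t : Char) :
    (let lotes := if dA.contains k then dA else dA.insert k (false, false, false)
     if t = '1' then lotes.modify k (false, false, false) (fun q => (true, q.2.1, q.2.2))
     else if t = '5' then lotes.modify k (false, false, false) (fun q => (q.1, true, q.2.2))
     else if t = '3' then lotes.modify k (false, false, false) (fun q => (q.1, q.2.1, true))
     else lotes).items = pvL (recs ++ [(k, t)]) := by
  by_cases hk : k ∈ pvDedup recs
  · have hc : dA.contains k = true := by rw [pvContains_L dA recs k h]; simp [hk]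
    have hded : pvDedup (recs ++ [(k, t)]) = pvDedup recs := by rw [pvDedup_append, if_pos hk]
    have hmap : ∀ (g : Bool × Bool × Bool → Bool × Bool × Bool),
        (g (pvFlags recs k) = pvFlags (recs ++ [(k, t)]) k) →
        (dA.modify k (false, false, false) g).items = pvL (recs ++ [(k, t)]) := by
      intro g hg
      show (dA.insert k (g (dA.getD k (false, false, false)))).items = _
      rw [PySem.Dict.items_insert, hc, if_pos rfl, h, pvGetD_L dA recs k h hk]
      unfold pvL
      rw [hded, List.map_map]
      apply List.map_congr_left
      intro k' _
      by_cases hkk : k' = k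
      · subst hkk
        simp [hg]
      · simp only [Function.comp_apply]
        rw [if_neg (by simp [hkk])]
        rw [pvFlags_append_ne recs k t k' hkk]
    simp only [hc, if_true]
    by_cases h1 : t = '1'
    · subst h1
      rw [if_pos rfl]
      exact hmap _ (by rw [pvFlags_append_self]; simp)
    · rw [if_neg h1]
      by_cases h5 : t = '5'
      · subst h5
        rw [if_pos rfl]
        exact hmap _ (by rw [pvFlags_append_self]; simp)
      · rw [if_neg h5]
        by_cases h3 : t = '3'
        · subst h3
          rw [if_pos rfl]
          exact hmap _ (by rw [pvFlags_append_self]; simp)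
        · rw [if_neg h3, h]
          unfold pvL
          rw [hded]
          apply List.map_congr_left
          intro k' _
          by_cases hkk : k' = k
          · subst hkk
            rw [pvFlags_append_self]
            simp [beq_eq_false_iff_ne.mpr h1, beq_eq_false_iff_ne.mpr h5, beq_eq_false_iff_ne.mpr h3]
          · rw [pvFlags_append_ne recs k t k' hkk]
  · have hc : dA.contains k = false := by rw [pvContains_L dA recs k h]; simp [hk]
    have hded : pvDedup (recs ++ [(k, t)]) = pvDedup recs ++ [k] := by
      rw [pvDedup_append, if_neg hk]
    have hflags : pvFlags recs k = (false, false, false) := pvFlags_of_not_mem recs k hk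
    have hitems1 : (dA.insert k (false, false, false)).items
        = pvL recs ++ [(k, (false, false, false))] := by
      rw [PySem.Dict.items_insert, hc, h]; rfl
    have hc1 : (dA.insert k (false, false, false)).contains k = true :=
      PySem.Dict.contains_insert_self _ _ _
    have hget1 : (dA.insert k (false, false, false)).getD k (false, false, false)
        = (false, false, false) := PySem.Dict.getD_insert_self _ _ _ _
    have hfirst : ∀ (v : Bool × Bool × Bool),
        (pvL recs).map (fun p => if p.1 == k then (k, v) else p)
          = (pvDedup recs).map (fun k' => (k', pvFlags (recs ++ [(k, t)]) k')) := by
      intro v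
      unfold pvL
      rw [List.map_map]
      apply List.map_congr_left
      intro k' hk'
      have hkk : k' ≠ k := fun hEq => hk (hEq ▸ hk')
      simp only [Function.comp_apply]
      rw [if_neg (by simp [hkk])]
      rw [pvFlags_append_ne recs k t k' hkk]
    have hmap : ∀ (g : Bool × Bool × Bool → Bool × Bool × Bool),
        (g (false, false, false) = pvFlags (recs ++ [(k, t)]) k) →
        ((dA.insert k (false, false, false)).modify k (false, false, false) g).items
          = pvL (recs ++ [(k, t)]) := by
      intro g hg
      show ((dA.insert k (false, false, false)).insert k
        (g ((dA.insert k (false, false, false)).getD k (false, false, false)))).items = _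
      rw [hget1, PySem.Dict.items_insert, hc1, if_pos rfl, hitems1, List.map_append, hfirst]
      unfold pvL
      rw [hded, List.map_append]
      simp [hg]
    simp only [hc, Bool.false_eq_true, if_false]
    by_cases h1 : t = '1'
    · subst h1
      rw [if_pos rfl]
      exact hmap _ (by rw [pvFlags_append_self, hflags]; simp)
    · rw [if_neg h1]
      by_cases h5 : t = '5'
      · subst h5
        rw [if_pos rfl]
        exact hmap _ (by rw [pvFlags_append_self, hflags]; simp)
      · rw [if_neg h5]
        by_cases h3 : t = '3'
        · subst h3
          rw [if_pos rfl]
          exact hmap _ (by rw [pvFlags_append_self, hflags]; simp)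
        · rw [if_neg h3, hitems1]
          have h2' : (pvDedup recs).map (fun k' => (k', pvFlags recs k'))
              = (pvDedup recs).map (fun k' => (k', pvFlags (recs ++ [(k, t)]) k')) := by
            apply List.map_congr_left
            intro k' hk'
            have hkk : k' ≠ k := fun hEq => hk (hEq ▸ hk')
            rw [pvFlags_append_ne recs k t k' hkk]
          unfold pvL
          rw [hded, List.map_append, h2']
          simp [pvFlags_append_self, hflags, beq_eq_false_iff_ne.mpr h1,
            beq_eq_false_iff_ne.mpr h5, beq_eq_false_iff_ne.mpr h3]

theorem pvRegs_cons (p : Int × String) (ps : List (Int × String)) :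
    pvRegs (p :: ps) =
      if PySem.Chars.strip p.2.toList = [] then pvRegs ps else p :: pvRegs ps := by
  unfold pvRegs
  rw [List.filter_cons]
  by_cases h : PySem.Chars.strip p.2.toList = [] <;> simp [h]

theorem pvShortMsgs_cons (p : Int × String) (ps : List (Int × String)) :
    pvShortMsgs (p :: ps) =
      if (pvRstripNl p.2.toList).length < 8 then pvMsgCurta p.1 :: pvShortMsgs ps
      else pvShortMsgs ps := by
  unfold pvShortMsgs
  rw [List.filter_cons]
  by_cases h : (pvRstripNl p.2.toList).length < 8 <;> simp [h]

theorem pvRecsOf_cons (p : Int × String) (ps : List (Int × String)) :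
    pvRecsOf (p :: ps) =
      match pvRecOf p with
      | some r => r :: pvRecsOf ps
      | none => pvRecsOf ps := by
  unfold pvRecsOf
  rw [List.filterMap_cons]
  cases pvRecOf p <;> rfl

-- A's loop, characterized by B's staged comprehensions
theorem pvLoopA (xs : List String) (i : Int) (e : List String)
    (recs : List (List Char × Char)) (dA : PySem.Dict (List Char) (Bool × Bool × Bool))
    (h : dA.items = pvL recs) :
    ((PySem.List.enumerate xs i).foldl pvStepA (e, dA)).1
        = e ++ pvShortMsgs (pvRegs (PySem.List.enumerate xs i)) ∧
    ((PySem.List.enumerate xs i).foldl pvStepA (e, dA)).2.items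
        = pvL (recs ++ pvRecsOf (pvRegs (PySem.List.enumerate xs i))) := by
  induction xs generalizing i e recs dA with
  | nil =>
    simp only [PySem.List.enumerate_nil, List.foldl_nil]
    exact ⟨by simp [pvRegs, pvShortMsgs], by simpa [pvRegs, pvRecsOf] using h⟩
  | cons x xs ih =>
    rw [PySem.List.enumerate_cons]
    simp only [List.foldl_cons]
    rw [pvRegs_cons]
    by_cases h1 : PySem.Chars.strip x.toList = []
    · have hA : pvStepA (e, dA) (i, x) = (e, dA) := by
        unfold pvStepA
        simp [h1]
      rw [hA, if_pos h1]
      exact ih (i + 1) e recs dA h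
    · rw [if_neg h1]
      rw [pvShortMsgs_cons, pvRecsOf_cons]
      by_cases h2 : (pvRstripNl x.toList).length < 8
      · have hA : pvStepA (e, dA) (i, x) = (e ++ [pvMsgCurta i], dA) := by
          unfold pvStepA
          simp [h1, h2]
        have hrec : pvRecOf (i, x) = none := by
          unfold pvRecOf
          simp [h2]
        rw [hA, if_pos h2, hrec]
        obtain ⟨ha, hb⟩ := ih (i + 1) (e ++ [pvMsgCurta i]) recs dA h
        exact ⟨by rw [ha]; simp, hb⟩
      · have hle : (pvRstripNl x.toList).length ≤ x.toList.length := by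
          unfold pvRstripNl
          simpa using List.length_dropWhile_le (fun c => c == '\n' || c == '\r') x.toList.reverse
        have h7 : 7 < x.toList.length := by omega
        have hsl : PySem.List.slice x.toList (some 7) (some 8) = [x.toList[7]] := by
          rw [PySem.List.slice_toNat x.toList (by norm_num) (by norm_num)]
          show List.take (8 - 7) (List.drop 7 x.toList) = _
          rw [List.drop_eq_getElem_cons h7]
          rfl
        have hpg : PySem.List.pyGetD x.toList 7 ' ' = x.toList[7] :=
          PySem.List.pyGetD_eq_getElem x.toList ' ' (by norm_num) (by exact_mod_cast h7)
        rw [if_neg h2]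
        by_cases h09 : x.toList[7] = '0' ∨ x.toList[7] = '9'
        · have hA : pvStepA (e, dA) (i, x) = (e, dA) := by
            unfold pvStepA
            rw [if_neg h1, if_neg h2]
            simp only [hsl]
            rw [if_pos (by rcases h09 with h' | h' <;> simp [h'])]
          have hrec : pvRecOf (i, x) = none := by
            unfold pvRecOf
            rw [if_neg h2]
            simp only [hpg]
            rw [if_pos h09]
          rw [hA, hrec]
          exact ih (i + 1) e recs dA h
        · have hrec : pvRecOf (i, x)
              = some (PySem.List.slice x.toList (some 3) (some 7), x.toList[7]) := by
            unfold pvRecOf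
            rw [if_neg h2]
            simp only [hpg]
            rw [if_neg h09]
          have hA : pvStepA (e, dA) (i, x) = (e,
              let lotes := if dA.contains (PySem.List.slice x.toList (some 3) (some 7)) then dA
                else dA.insert (PySem.List.slice x.toList (some 3) (some 7)) (false, false, false)
              if [x.toList[7]] = ['1'] then lotes.modify (PySem.List.slice x.toList (some 3) (some 7))
                  (false, false, false) (fun q => (true, q.2.1, q.2.2))
              else if [x.toList[7]] = ['5'] then lotes.modify (PySem.List.slice x.toList (some 3) (some 7))
                  (false, false, false) (fun q => (q.1, true, q.2.2))
              else if [x.toList[7]] = ['3'] then lotes.modify (PySem.List.slice x.toList (some 3) (some 7))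
                  (false, false, false) (fun q => (q.1, q.2.1, true))
              else lotes) := by
            unfold pvStepA
            rw [if_neg h1, if_neg h2]
            simp only [hsl]
            rw [if_neg (by simpa using h09)]
          have hstep : (pvStepA (e, dA) (i, x)).2.items
              = pvL (recs ++ [(PySem.List.slice x.toList (some 3) (some 7), x.toList[7])]) := by
            rw [hA]
            have := pvDictStep recs dA h (PySem.List.slice x.toList (some 3) (some 7)) x.toList[7]
            simp only at this ⊢
            simpa using this
          rw [hrec]
          obtain ⟨ha, hb⟩ := ih (i + 1) (pvStepA (e, dA) (i, x)).1
            (recs ++ [(PySem.List.slice x.toList (some 3) (some 7), x.toList[7])])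
            (pvStepA (e, dA) (i, x)).2 hstep
          have he : (pvStepA (e, dA) (i, x)).1 = e := by rw [hA]
          refine ⟨by rw [ha, he], by rw [hb, List.append_assoc]; rfl⟩

-- A's final loop over items = B's final loop over the lot list
theorem pvFinalFold (recs : List (List Char × Char)) (d : List (List Char)) (e : List String) :
    (d.map (fun k => (k, pvFlags recs k))).foldl (fun erros q =>
      let erros := if q.2.1 = false then erros ++ [pvMsgHeader q.1] else erros
      let erros := if q.2.2.1 = false then erros ++ [pvMsgTrailer q.1] else erros
      if q.2.2.2 = false then erros ++ [pvMsgDetalhe q.1] else erros) e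
    = d.foldl (fun e k =>
      let e := if recs.any (fun r => r.1 == k && r.2 == '1') = false then e ++ [pvMsgHeader k] else e
      let e := if recs.any (fun r => r.1 == k && r.2 == '5') = false then e ++ [pvMsgTrailer k] else e
      if recs.any (fun r => r.1 == k && r.2 == '3') = false then e ++ [pvMsgDetalhe k] else e) e := by
  induction d generalizing e with
  | nil => rfl
  | cons a t ih =>
    simp only [List.map_cons, List.foldl_cons]
    exact ih _

-- ===== VERDICT (by name: the statement is the Claim_ definition above) =====
theorem validar_lotes_cnab240_spec : Claim_equal_validar_lotes_cnab240 := by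
  intro linhas _
  unfold Spec_validar_lotes_cnab240 validar_lotes_cnab240 validar_lotes_cnab240_alt
  obtain ⟨h1, h2⟩ := pvLoopA linhas 1 [] [] PySem.Dict.empty rfl
  dsimp only
  rw [h1, h2]
  simp only [List.nil_append]
  unfold pvL
  rw [pvFinalFold]
  rfl
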